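-- pv_equiv track=rewrite | github.com/mysticflounder/modular-schur | scripts/schur_mod.py | _reachable_residues_by_length
-- ===== SOURCE A (Python) =====
-- from typing import Iterable, Sequence
--
-- def _reachable_residues_by_length(
--     values: Sequence[int],
--     m: int,
--     max_length: int,
-- ) -> list[set[int]]:
--     reachable: list[set[int]] = [set() for _ in range(max_length + 1)]
--     reachable[0] = {0}
--     residues = [value % m for value in values]
--     for length in range(1, max_length + 1):
--         current: set[int] = set()
--         for residue in reachable[length - 1]:
--             for value_residue in residues:
--                 current.add((residue + value_residue) % m)
--         reachable[length] = current
--     return reachable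
-- ===== SOURCE B (Python) =====
-- def _reachable_residues_by_length(values, m, max_length):
--     residues = [value % m for value in values]
--     seq = [[0]]
--     seen = {(0,): 0}
--     k = 1
--     while k <= max_length:
--         cur = []
--         cur_set = set()
--         for r in seq[-1]:
--             for v in residues:
--                 t = (r + v) % m
--                 if t not in cur_set:
--                     cur_set.add(t)
--                     cur.append(t)
--         key = tuple(cur)
--         if key in seen:
--             i = seen[key]
--             p = k - i
--             for j in range(k, max_length + 1):
--                 seq.append(seq[i + (j - i) % p])
--             break
--         seen[key] = k
--         seq.append(cur)
--         k += 1
--     return [set(s) for s in seq]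
-- ===== Notes on version B (the rewrite author's own statement) =====
-- stated objective: faster
-- what changed: Instead of running the sumset step for every length 1..max_length, B detects the first repeated reachable-set state of the deterministic sequence and fills the remaining rows by replicating the detected period, and its inner step builds an ordered dedup list guarded by a membership set.
import Mathlib
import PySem

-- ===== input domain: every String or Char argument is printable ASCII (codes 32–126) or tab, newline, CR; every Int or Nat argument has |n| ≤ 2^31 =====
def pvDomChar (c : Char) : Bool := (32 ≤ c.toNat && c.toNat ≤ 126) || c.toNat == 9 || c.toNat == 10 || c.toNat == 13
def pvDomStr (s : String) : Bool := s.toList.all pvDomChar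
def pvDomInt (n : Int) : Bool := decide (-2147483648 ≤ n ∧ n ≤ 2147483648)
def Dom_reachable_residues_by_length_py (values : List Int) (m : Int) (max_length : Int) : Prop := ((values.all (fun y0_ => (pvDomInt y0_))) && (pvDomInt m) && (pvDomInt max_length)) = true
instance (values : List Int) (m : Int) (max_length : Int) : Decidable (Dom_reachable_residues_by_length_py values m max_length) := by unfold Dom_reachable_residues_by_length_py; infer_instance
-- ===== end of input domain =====

-- B replaces the max_length rounds of sumset iteration by cycle detection on the
-- deterministic sequence of reachable sets, replicating the detected period; asymptotically
-- faster for large max_length.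

-- ===== PORT A =====
-- A's inner double loop: current.add((residue + value_residue) % m)
def pvStepA (residues : List Int) (m : Int) (prev : List Int) : PySem.Set Int :=
  prev.foldl (fun current residue =>
    residues.foldl (fun current value_residue =>
      PySem.Set.add current (PySem.Int.mod (residue + value_residue) m)) current)
    PySem.Set.empty

def reachable_residues_by_length_py (values : List Int) (m : Int) (max_length : Int) : List (List Int) :=
  let reachable : List (List Int) :=
    (PySem.List.pyRange 0 (max_length + 1) 1).map (fun _ => PySem.Set.empty)
  -- reachable[0] = {0}; the IndexError case (max_length < 0) is excluded by Pre_
  let reachable := PySem.List.pySetD reachable 0 [0]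
  let residues := values.map (fun value => PySem.Int.mod value m)
  (PySem.List.pyRange 1 (max_length + 1) 1).foldl
    (fun reachable length =>
      PySem.List.pySetD reachable length
        (pvStepA residues m (PySem.List.pyGetD reachable (length - 1) [])))
    reachable

-- ===== PORT B =====
-- B's inner loop: ordered dedup list `cur` guarded by membership set `cur_set`
def pvStepB (residues : List Int) (m : Int) (prev : List Int) : List Int × PySem.Set Int :=
  prev.foldl (fun st r =>
    residues.foldl (fun (st : List Int × PySem.Set Int) v =>
      let t := PySem.Int.mod (r + v) m
      if PySem.Set.contains st.2 t then st
      else (st.1 ++ [t], PySem.Set.add st.2 t)) st)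
    ([], PySem.Set.empty)

-- B's while loop; fuel counts the remaining iterations (k runs 1, …, max_length).
-- Python's replication loop appends seq[i + (j-i) % p] for j = k..max_length; every such
-- index is ≤ k-1, inside the seq present at the break, so the loop never reads a cell it
-- appended and equals this map over the fixed seq.
def pvLoopB (residues : List Int) (m : Int) (max_length : Int)
    (seen : PySem.Dict (List Int) Int) (seq : List (List Int)) (k : Int) :
    Nat → List (List Int)
  | 0 => seq
  | fuel + 1 =>
    if k ≤ max_length then
      let cur := (pvStepB residues m (PySem.List.pyGetD seq (-1) [])).1
      match PySem.Dict.get? seen cur with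
      | some i =>
          seq ++ (PySem.List.pyRange k (max_length + 1) 1).map
            (fun j => PySem.List.pyGetD seq (i + PySem.Int.mod (j - i) (k - i)) [])
      | none =>
          pvLoopB residues m max_length (PySem.Dict.insert seen cur k) (seq ++ [cur]) (k + 1) fuel
    else seq

def reachable_residues_by_length_py_alt (values : List Int) (m : Int) (max_length : Int) : List (List Int) :=
  let residues := values.map (fun value => PySem.Int.mod value m)
  let seq := pvLoopB residues m max_length
      (PySem.Dict.insert PySem.Dict.empty [0] 0) [[0]] 1 max_length.toNat
  seq.map (fun s => PySem.Set.ofList s)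

-- ===== PRECONDITION & SPEC =====
-- Pre_ excludes exactly the inputs on which A raises: m = 0 (ZeroDivisionError in value % m)
-- and max_length < 0 (IndexError at reachable[0] on the empty pre-allocated list).
def Pre_reachable_residues_by_length_py (values : List Int) (m : Int) (max_length : Int) : Prop :=
  m ≠ 0 ∧ 0 ≤ max_length
instance (values : List Int) (m : Int) (max_length : Int) : Decidable (Pre_reachable_residues_by_length_py values m max_length) := by unfold Pre_reachable_residues_by_length_py; infer_instance

def pvWitness_reachable_residues_by_length_py : List Int × Int × Int := ([1, 2], 5, 3)

def Spec_reachable_residues_by_length_py (values : List Int) (m : Int) (max_length : Int) (out : List (List Int)) : Prop := out = reachable_residues_by_length_py_alt values m max_length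
instance (values : List Int) (m : Int) (max_length : Int) (out : List (List Int)) : Decidable (Spec_reachable_residues_by_length_py values m max_length out) := by unfold Spec_reachable_residues_by_length_py; infer_instance

-- ===== CLAIM (what is proved, stated in full; the proofs are below) =====
def Claim_equal_reachable_residues_by_length_py : Prop := ∀ (values : List Int) (m : Int) (max_length : Int), Dom_reachable_residues_by_length_py values m max_length → Pre_reachable_residues_by_length_py values m max_length → Spec_reachable_residues_by_length_py values m max_length (reachable_residues_by_length_py values m max_length)


-- ===== LEMMAS AND PROOFS =====

-- the iterated sumset chain: chain 0 = {0}, chain (n+1) = step (chain n)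
def pvChain (residues : List Int) (m : Int) : Nat → List Int
  | 0 => [0]
  | n + 1 => pvStepA residues m (pvChain residues m n)

theorem pvAdd_eq_if (s : PySem.Set Int) (x : Int) :
    PySem.Set.add s x = if PySem.Set.contains s x = true then s else s ++ [x] := rfl

theorem pvInner (residues : List Int) (m r : Int) (s : List Int) :
    residues.foldl (fun (st : List Int × PySem.Set Int) v =>
      if PySem.Set.contains st.2 (PySem.Int.mod (r + v) m) then st
      else (st.1 ++ [PySem.Int.mod (r + v) m], PySem.Set.add st.2 (PySem.Int.mod (r + v) m)))
      (s, s)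
    = (residues.foldl (fun c v => PySem.Set.add c (PySem.Int.mod (r + v) m)) s,
       residues.foldl (fun c v => PySem.Set.add c (PySem.Int.mod (r + v) m)) s) := by
  induction residues generalizing s with
  | nil => rfl
  | cons v vs ih =>
    simp only [List.foldl_cons]
    have hstep : (if PySem.Set.contains s (PySem.Int.mod (r + v) m) = true
          then ((s, s) : List Int × PySem.Set Int)
          else (s ++ [PySem.Int.mod (r + v) m], PySem.Set.add s (PySem.Int.mod (r + v) m)))
        = (PySem.Set.add s (PySem.Int.mod (r + v) m), PySem.Set.add s (PySem.Int.mod (r + v) m)) := by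
      by_cases hc : PySem.Set.contains s (PySem.Int.mod (r + v) m) = true
      · rw [if_pos hc, pvAdd_eq_if, if_pos hc]
      · rw [if_neg hc, pvAdd_eq_if, if_neg hc]
    rw [hstep, ih]

theorem pvStepB_fst (residues : List Int) (m : Int) (prev : List Int) :
    (pvStepB residues m prev).1 = pvStepA residues m prev := by
  simp only [pvStepB, pvStepA]
  suffices h : ∀ s : List Int,
      prev.foldl (fun st r =>
        residues.foldl (fun (st : List Int × PySem.Set Int) v =>
          if PySem.Set.contains st.2 (PySem.Int.mod (r + v) m) then st
          else (st.1 ++ [PySem.Int.mod (r + v) m], PySem.Set.add st.2 (PySem.Int.mod (r + v) m))) st)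
        (s, s)
      = (prev.foldl (fun current residue =>
          residues.foldl (fun current value_residue =>
            PySem.Set.add current (PySem.Int.mod (residue + value_residue) m)) current) s,
         prev.foldl (fun current residue =>
          residues.foldl (fun current value_residue =>
            PySem.Set.add current (PySem.Int.mod (residue + value_residue) m)) current) s) by
    rw [show (([], PySem.Set.empty) : List Int × PySem.Set Int)
        = ((PySem.Set.empty : PySem.Set Int), (PySem.Set.empty : PySem.Set Int)) from rfl, h]
  intro s
  induction prev generalizing s with
  | nil => rfl
  | cons r rs ih =>
    simp only [List.foldl_cons, pvInner, ih]

theorem pvAdd_nodup (s : PySem.Set Int) (x : Int) (h : List.Nodup s) :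
    List.Nodup (PySem.Set.add s x) := by
  by_cases hm : x ∈ s
  · simpa [PySem.Set.add, PySem.Set.contains, hm]
  · have hnd : List.Nodup (s ++ [x]) := by
      rw [List.nodup_append]
      refine ⟨h, List.nodup_singleton x, ?_⟩
      intro a ha b hb he
      have hbx : b = x := by simpa using hb
      rw [he, hbx] at ha
      exact hm ha
    simpa [PySem.Set.add, PySem.Set.contains, hm] using hnd

theorem pvInnerFold_nodup (residues : List Int) (m r : Int) :
    ∀ s : PySem.Set Int, List.Nodup s →
      List.Nodup (residues.foldl (fun c v => PySem.Set.add c (PySem.Int.mod (r + v) m)) s) := by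
  induction residues with
  | nil => intro s hs; exact hs
  | cons v vs ih =>
    intro s hs
    simp only [List.foldl_cons]
    exact ih _ (pvAdd_nodup _ _ hs)

theorem pvStepA_nodup (residues : List Int) (m : Int) (prev : List Int) :
    List.Nodup (pvStepA residues m prev) := by
  simp only [pvStepA]
  suffices h : ∀ s : PySem.Set Int, List.Nodup s →
      List.Nodup (prev.foldl (fun current residue =>
        residues.foldl (fun current value_residue =>
          PySem.Set.add current (PySem.Int.mod (residue + value_residue) m)) current) s) by
    exact h _ (by simp [PySem.Set.empty])
  induction prev with
  | nil => intro s hs; exact hs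
  | cons r rs ih =>
    intro s hs
    simp only [List.foldl_cons]
    exact ih _ (pvInnerFold_nodup residues m r s hs)

theorem pvChain_nodup (residues : List Int) (m : Int) (n : Nat) :
    List.Nodup (pvChain residues m n) := by
  cases n with
  | zero => simp [pvChain]
  | succ n => exact pvStepA_nodup residues m (pvChain residues m n)

theorem pvFoldlAdd_of_nodup :
    ∀ (xs s : List Int), List.Nodup (s ++ xs) → xs.foldl PySem.Set.add s = s ++ xs := by
  intro xs
  induction xs with
  | nil => intro s _; simp
  | cons x xs ih =>
    intro s hs
    have hx : x ∉ s := by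
      intro hmem
      have := List.disjoint_of_nodup_append hs
      exact this hmem (by simp)
    have hadd : PySem.Set.add s x = s ++ [x] := by
      simp [PySem.Set.add, PySem.Set.contains, hx]
    simp only [List.foldl_cons, hadd]
    rw [ih (s ++ [x]) (by simpa using hs)]
    simp

theorem pvOfList_of_nodup (xs : List Int) (h : List.Nodup xs) : PySem.Set.ofList xs = xs := by
  have := pvFoldlAdd_of_nodup xs [] (by simpa using h)
  simpa [PySem.Set.ofList_eq_foldl] using this

theorem pvChain_add (residues : List Int) (m : Int) (a s : Nat) :
    pvChain residues m (a + s) = (pvStepA residues m)^[s] (pvChain residues m a) := by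
  induction s with
  | zero => rfl
  | succ s ih =>
    have : a + (s + 1) = (a + s) + 1 := rfl
    rw [this, Function.iterate_succ_apply']
    show pvStepA residues m (pvChain residues m (a + s)) = _
    rw [ih]

theorem pvChain_period (residues : List Int) (m : Int) (i p : Nat) (hp : 0 < p)
    (h : pvChain residues m i = pvChain residues m (i + p)) (t : Nat) :
    pvChain residues m (i + t) = pvChain residues m (i + t % p) := by
  induction t using Nat.strong_induction_on with
  | _ t ih =>
    by_cases hlt : t < p
    · rw [Nat.mod_eq_of_lt hlt]
    · have ht : t = (t - p) + p := by omega
      have h1 : pvChain residues m (i + t) = pvChain residues m (i + (t - p)) := by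
        have e : i + t = (i + p) + (t - p) := by omega
        rw [e, pvChain_add residues m (i + p) (t - p), ← h, ← pvChain_add residues m i (t - p)]
      have h2 : (t - p) % p = t % p := by
        conv_rhs => rw [ht]
        rw [Nat.add_mod_right]
      rw [h1, ih (t - p) (by omega), h2]

theorem pvA_fold (residues : List Int) (m : Int) (NN : Nat) :
    ∀ n : Nat, n ≤ NN →
      (PySem.List.pyRange 1 (1 + (n : Int)) 1).foldl
        (fun reachable length =>
          PySem.List.pySetD reachable length
            (pvStepA residues m (PySem.List.pyGetD reachable (length - 1) [])))
        ([0] :: List.replicate NN ([] : List Int))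
      = (List.range (n + 1)).map (pvChain residues m) ++ List.replicate (NN - n) ([] : List Int) := by
  intro n
  induction n with
  | zero =>
    intro _
    rw [show (1 + ((0 : Nat) : Int)) = 1 by norm_num, PySem.List.pyRange_one_eq_nil le_rfl]
    simp [pvChain]
  | succ n ih =>
    intro hn
    rw [show (1 + ((n + 1 : Nat) : Int)) = (1 + (n : Int)) + 1 by push_cast; ring]
    rw [PySem.List.pyRange_one_succ_right (by omega : (1 : Int) ≤ 1 + (n : Int))]
    rw [List.foldl_append, ih (by omega)]
    simp only [List.foldl_cons, List.foldl_nil]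
    have hidx : (1 + (n : Int)) - 1 = ((n : Nat) : Int) := by ring
    rw [hidx, PySem.List.pyGetD_natCast]
    have hget : ((List.range (n + 1)).map (pvChain residues m)
        ++ List.replicate (NN - n) ([] : List Int)).getD n [] = pvChain residues m n := by
      rw [List.getD_eq_getElem?_getD, List.getElem?_append_left (by simp)]
      simp
    rw [hget]
    have hset : (1 + (n : Int)) = (((n + 1 : Nat)) : Int) := by push_cast; ring
    rw [hset, PySem.List.pySetD_natCast]
    have hlen : ((List.range (n + 1)).map (pvChain residues m)).length = n + 1 := by simp
    rw [List.set_append_right _ _ (by omega)]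
    have hrep : NN - n = (NN - (n + 1)) + 1 := by omega
    rw [hlen, hrep]
    have : (n + 1) - (n + 1) = 0 := by omega
    rw [this, List.replicate_succ, List.set_cons_zero]
    rw [List.range_succ (n := n + 1)]
    simp [pvChain, List.append_assoc]

theorem pvA_eq_chain (values : List Int) (m N : Int) (hN : 0 ≤ N) :
    reachable_residues_by_length_py values m N
      = (List.range (N.toNat + 1)).map (pvChain (values.map (fun value => PySem.Int.mod value m)) m) := by
  simp only [reachable_residues_by_length_py]
  have hinit : (PySem.List.pyRange 0 (N + 1) 1).map (fun _ => (PySem.Set.empty : PySem.Set Int))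
      = List.replicate (N.toNat + 1) ([] : List Int) := by
    rw [List.map_const']
    rw [PySem.List.length_pyRange_one]
    congr 1
    omega
  rw [hinit]
  have hset : PySem.List.pySetD (List.replicate (N.toNat + 1) ([] : List Int)) 0 [0]
      = [0] :: List.replicate N.toNat ([] : List Int) := by
    rw [show (0 : Int) = ((0 : Nat) : Int) from rfl, PySem.List.pySetD_natCast]
    rw [List.replicate_succ, List.set_cons_zero]
  rw [hset]
  have hr : N + 1 = 1 + ((N.toNat : Nat) : Int) := by omega
  rw [hr, pvA_fold (values.map (fun value => PySem.Int.mod value m)) m N.toNat N.toNat le_rfl]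
  simp

theorem pvLoopB_eq_chain (residues : List Int) (m N : Int) :
    ∀ (fuel : Nat) (k : Int) (seen : PySem.Dict (List Int) Int) (seq : List (List Int)),
      k + fuel = N + 1 → 1 ≤ k →
      seq = (List.range k.toNat).map (pvChain residues m) →
      (∀ key i, PySem.Dict.get? seen key = some i →
        0 ≤ i ∧ i < k ∧ pvChain residues m i.toNat = key) →
      pvLoopB residues m N seen seq k fuel
        = (List.range (N.toNat + 1)).map (pvChain residues m) := by
  intro fuel
  induction fuel with
  | zero =>
    intro k seen seq hk hk1 hseq hseen
    subst hseq
    show (List.range k.toNat).map (pvChain residues m) = _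
    have : k.toNat = N.toNat + 1 := by omega
    rw [this]
  | succ fuel ih =>
    intro k seen seq hk hk1 hseq hseen
    subst hseq
    have hkN : k ≤ N := by omega
    have hkk1 : 1 ≤ k.toNat := by omega
    simp only [pvLoopB, if_pos hkN]
    have hne : (List.range k.toNat).map (pvChain residues m) ≠ [] := by
      simp [List.range_eq_nil]
      omega
    have hlast : PySem.List.pyGetD ((List.range k.toNat).map (pvChain residues m)) (-1) []
        = pvChain residues m (k.toNat - 1) := by
      rw [PySem.List.pyGetD_neg_one _ _ hne, List.getLast_eq_getElem]
      simp
    have hcur : (pvStepB residues m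
        (PySem.List.pyGetD ((List.range k.toNat).map (pvChain residues m)) (-1) [])).1
        = pvChain residues m k.toNat := by
      rw [hlast, pvStepB_fst]
      have h1 : k.toNat = (k.toNat - 1) + 1 := by omega
      conv_rhs => rw [h1]
      rfl
    rw [hcur]
    cases hget : PySem.Dict.get? seen (pvChain residues m k.toNat) with
    | none =>
      show pvLoopB residues m N (PySem.Dict.insert seen (pvChain residues m k.toNat) k)
          ((List.range k.toNat).map (pvChain residues m) ++ [pvChain residues m k.toNat]) (k + 1) fuel = _
      refine ih (k + 1) _ _ (by omega) (by omega) ?_ ?_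
      · have : (k + 1).toNat = k.toNat + 1 := by omega
        rw [this, List.range_succ]
        simp
      · intro key i h
        rw [PySem.Dict.get?_insert] at h
        split_ifs at h with hkey
        · have hik : i = k := by exact_mod_cast (Option.some.injEq _ _).mp h.symm
          refine ⟨by omega, by omega, ?_⟩
          rw [hik, hkey]
        · have := hseen key i h
          exact ⟨this.1, by omega, this.2.2⟩
    | some i =>
      show (List.range k.toNat).map (pvChain residues m)
          ++ (PySem.List.pyRange k (N + 1) 1).map
            (fun j => PySem.List.pyGetD ((List.range k.toNat).map (pvChain residues m))
              (i + PySem.Int.mod (j - i) (k - i)) []) = _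
      obtain ⟨hi0, hik, hchain⟩ := hseen _ _ hget
      have hp : (0 : Int) < k - i := by omega
      have hik' : i.toNat < k.toNat := by omega
      set i' := i.toNat with hi'
      set p' : Nat := k.toNat - i' with hp'
      have hpp : 0 < p' := by omega
      have hper : pvChain residues m i' = pvChain residues m (i' + p') := by
        rw [show i' + p' = k.toNat by omega]
        exact hchain
      have hsplit : N.toNat + 1 = k.toNat + (fuel + 1) := by omega
      rw [hsplit, List.range_add, List.map_append]
      congr 1
      have hrange : PySem.List.pyRange k (N + 1) 1
          = (List.range (fuel + 1)).map (fun (o : Nat) => k + (o : Int)) := by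
        rw [PySem.List.pyRange_one]
        rw [show (N + 1 - k).toNat = fuel + 1 by omega]
      rw [hrange, List.map_map, List.map_map]
      apply List.map_congr_left
      intro o _
      show PySem.List.pyGetD ((List.range k.toNat).map (pvChain residues m))
          (i + PySem.Int.mod ((k + (o : Int)) - i) (k - i)) [] = pvChain residues m (k.toNat + o)
      have hmod : PySem.Int.mod ((k + (o : Int)) - i) (k - i)
          = (((p' + o) % p' : Nat) : Int) := by
        rw [PySem.Int.mod_eq_emod_of_pos hp]
        have e1 : (k + (o : Int)) - i = ((p' + o : Nat) : Int) := by omega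
        have e2 : k - i = ((p' : Nat) : Int) := by push_cast; omega
        rw [e1, e2]
        exact (Int.natCast_mod _ _).symm
      rw [hmod]
      have hmlt : (p' + o) % p' < p' := Nat.mod_lt _ hpp
      have hidx : i + (((p' + o) % p' : Nat) : Int) = ((i' + (p' + o) % p' : Nat) : Int) := by
        push_cast; omega
      rw [hidx, PySem.List.pyGetD_natCast]
      rw [List.getD_eq_getElem?_getD, List.getElem?_map, List.getElem?_range (by omega)]
      show pvChain residues m (i' + (p' + o) % p') = pvChain residues m (k.toNat + o)
      rw [← pvChain_period residues m i' p' hpp hper (p' + o)]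
      congr 1
      omega

theorem pvB_eq_chain (values : List Int) (m N : Int) (hN : 0 ≤ N) :
    reachable_residues_by_length_py_alt values m N
      = (List.range (N.toNat + 1)).map (pvChain (values.map (fun value => PySem.Int.mod value m)) m) := by
  simp only [reachable_residues_by_length_py_alt]
  rw [pvLoopB_eq_chain (values.map (fun value => PySem.Int.mod value m)) m N N.toNat 1
      (PySem.Dict.insert PySem.Dict.empty [0] 0) [[0]] (by omega) le_rfl
      (by simp [pvChain])
      (by
        intro key i h
        rw [PySem.Dict.get?_insert] at h
        split_ifs at h with hkey
        · have : i = 0 := by exact_mod_cast (Option.some.injEq _ _).mp h.symm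
          refine ⟨by omega, by omega, ?_⟩
          rw [this, hkey]
          rfl
        · simp [PySem.Dict.get?, PySem.Dict.empty] at h)]
  rw [List.map_map]
  apply List.map_congr_left
  intro n _
  exact pvOfList_of_nodup _ (pvChain_nodup _ _ _)

-- ===== VERDICT (by name: the statement is the Claim_ definition above) =====
theorem reachable_residues_by_length_py_spec : Claim_equal_reachable_residues_by_length_py := by
  intro values m N _ hPre
  unfold Spec_reachable_residues_by_length_py
  rw [pvA_eq_chain values m N hPre.2, pvB_eq_chain values m N hPre.2]
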